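-- pv_equiv track=rewrite | github.com/olnikonoff/ScriptSample | photo script.py | lineTrace_
-- ===== SOURCE A (Python) =====
-- def lineTrace_(binaryArray):
--     MaxDashSize=10 #after this val start calculating new line
--     MinLineSize=5 # minimum Line size to saving
--     dashSize=0
--     lineLen=0
--     lines=[]
--     for x in binaryArray:
--         if x:#start or cont len counter
--             dashSize=0
--             lineLen+=1
--         else:
--             dashSize+=1
--             if(dashSize>MaxDashSize):
--                 lines.append(lineLen) if lineLen>0 else False
--                 lineLen=0
--                 dashSize = 0
--     lines.append(lineLen) if lineLen > 0 else False
--     return list(filter(lambda x: x > MinLineSize, lines))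
-- ===== SOURCE B (Python) =====
-- def lineTrace_(binaryArray):
--     # Run-length decomposition: compress into (isOne, runLength) groups first,
--     # then scan the groups (a zero-run longer than 10 flushes the current line).
--     groups = []
--     cur = None  # current run: (key, length)
--     for x in binaryArray:
--         k = bool(x)
--         if cur is not None and cur[0] == k:
--             cur = (k, cur[1] + 1)
--         else:
--             if cur is not None:
--                 groups.append(cur)
--             cur = (k, 1)
--     if cur is not None:
--         groups.append(cur)
--     lineLen = 0
--     lines = []
--     for k, n in groups:
--         if k:
--             lineLen += n
--         elif n > 10:
--             if lineLen > 0: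
--                 lines.append(lineLen)
--             lineLen = 0
--     if lineLen > 0:
--         lines.append(lineLen)
--     return [x for x in lines if x > 5]
-- ===== Notes on version B (the rewrite author's own statement) =====
-- stated objective: alternative
-- what changed: B first compresses the input into a run-length encoding of (truthy, length) groups and then scans the groups, flushing on a zero-run longer than 10, instead of A's per-element dash/line counter scan.
import Mathlib
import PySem

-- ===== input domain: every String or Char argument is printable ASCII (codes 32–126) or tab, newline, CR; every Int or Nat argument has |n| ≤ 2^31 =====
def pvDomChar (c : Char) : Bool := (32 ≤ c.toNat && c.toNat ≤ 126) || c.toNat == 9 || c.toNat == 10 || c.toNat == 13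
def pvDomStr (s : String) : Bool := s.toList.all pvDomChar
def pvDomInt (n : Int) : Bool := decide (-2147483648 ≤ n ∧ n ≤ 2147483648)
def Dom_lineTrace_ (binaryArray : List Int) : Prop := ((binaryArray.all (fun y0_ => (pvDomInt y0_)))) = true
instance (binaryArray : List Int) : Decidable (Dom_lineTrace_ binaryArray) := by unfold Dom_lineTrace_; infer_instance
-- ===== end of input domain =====

-- B rewrites A as a two-stage pass: run-length encode, then scan the runs (objective: alternative decomposition, same O(n) cost).

-- ===== PORT A =====
-- state: (dashSize, lineLen, lines)
def pvStepA (st : Int × Int × List Int) (x : Int) : Int × Int × List Int :=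
  if x ≠ 0 then (0, st.2.1 + 1, st.2.2)
  else
    let dash := st.1 + 1
    if dash > 10 then (0, 0, if st.2.1 > 0 then st.2.2 ++ [st.2.1] else st.2.2)
    else (dash, st.2.1, st.2.2)

def lineTrace_ (binaryArray : List Int) : List Int :=
  let s := binaryArray.foldl pvStepA (0, 0, [])
  let lines := if s.2.1 > 0 then s.2.2 ++ [s.2.1] else s.2.2
  lines.filter (fun x => decide (x > 5))

-- ===== PORT B =====
-- phase 1: run-length encoding; state: (finished groups, current run)
def pvStepG (st : List (Bool × Int) × Option (Bool × Int)) (x : Int) :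
    List (Bool × Int) × Option (Bool × Int) :=
  let k : Bool := decide (x ≠ 0)
  match st.2 with
  | some c => if c.1 == k then (st.1, some (k, c.2 + 1)) else (st.1 ++ [c], some (k, 1))
  | none => (st.1, some (k, 1))

-- phase 2: scan the groups; state: (lineLen, lines)
def pvStepL (st : Int × List Int) (g : Bool × Int) : Int × List Int :=
  if g.1 then (st.1 + g.2, st.2)
  else if g.2 > 10 then (0, if st.1 > 0 then st.2 ++ [st.1] else st.2)
  else st

def lineTrace__alt (binaryArray : List Int) : List Int :=
  let p := binaryArray.foldl pvStepG ([], none)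
  let groups := p.1 ++ (match p.2 with | some c => [c] | none => [])
  let q := groups.foldl pvStepL (0, [])
  (if q.1 > 0 then q.2 ++ [q.1] else q.2).filter (fun x => decide (x > 5))

-- ===== PRECONDITION & SPEC =====
def Spec_lineTrace_ (binaryArray : List Int) (out : List Int) : Prop := out = lineTrace__alt binaryArray
instance (binaryArray : List Int) (out : List Int) : Decidable (Spec_lineTrace_ binaryArray out) := by unfold Spec_lineTrace_; infer_instance

-- ===== CLAIM (what is proved, stated in full; the proofs are below) =====
def Claim_equal_lineTrace_ : Prop := ∀ (binaryArray : List Int), Dom_lineTrace_ binaryArray → Spec_lineTrace_ binaryArray (lineTrace_ binaryArray)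

-- ===== LEMMAS AND PROOFS =====

-- finalize A's fold state / B's fold state into the (unfiltered) line list
def pvFinA (s : Int × Int × List Int) : List Int :=
  if s.2.1 > 0 then s.2.2 ++ [s.2.1] else s.2.2

def pvFinB (p : List (Bool × Int) × Option (Bool × Int)) : List Int :=
  let groups := p.1 ++ (match p.2 with | some c => [c] | none => [])
  let q := groups.foldl pvStepL (0, [])
  if q.1 > 0 then q.2 ++ [q.1] else q.2

-- invariant linking A's running state to B's run-length state
def pvInv (dash len : Int) (lines : List Int)
    (gs : List (Bool × Int)) (cur : Option (Bool × Int)) : Prop :=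
  match cur with
  | none => gs = [] ∧ dash = 0 ∧ len = 0 ∧ lines = []
  | some (true, n) =>
      1 ≤ n ∧ dash = 0 ∧ len = (gs.foldl pvStepL (0, [])).1 + n ∧
        lines = (gs.foldl pvStepL (0, [])).2
  | some (false, n) =>
      1 ≤ n ∧ dash = n % 11 ∧
        len = (if 11 ≤ n then 0 else (gs.foldl pvStepL (0, [])).1) ∧
        lines = (gs.foldl pvStepL (0, [])).2 ++
          (if 11 ≤ n ∧ (gs.foldl pvStepL (0, [])).1 > 0 then [(gs.foldl pvStepL (0, [])).1] else [])

lemma pvStepG_none (gs : List (Bool × Int)) (x : Int) :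
    pvStepG (gs, none) x = (gs, some (decide (x ≠ 0), 1)) := rfl

lemma pvStepG_some (gs : List (Bool × Int)) (k : Bool) (n : Int) (x : Int) :
    pvStepG (gs, some (k, n)) x =
      if k == decide (x ≠ 0) then (gs, some (decide (x ≠ 0), n + 1))
      else (gs ++ [(k, n)], some (decide (x ≠ 0), 1)) := rfl

lemma pvStepL_false (p : Int × List Int) (n : Int) :
    pvStepL p (false, n) =
      if n > 10 then (0, if p.1 > 0 then p.2 ++ [p.1] else p.2) else p := rfl

lemma pvStepL_true (p : Int × List Int) (n : Int) :
    pvStepL p (true, n) = (p.1 + n, p.2) := rfl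

lemma pv_main (xs : List Int) :
    ∀ (dash len : Int) (lines : List Int) (gs : List (Bool × Int)) (cur : Option (Bool × Int)),
    pvInv dash len lines gs cur →
    pvFinA (xs.foldl pvStepA (dash, len, lines)) = pvFinB (xs.foldl pvStepG (gs, cur)) := by
  induction xs with
  | nil =>
      intro dash len lines gs cur hInv
      simp only [List.foldl_nil]
      match cur with
      | none =>
          obtain ⟨h1, h2, h3, h4⟩ := hInv
          subst h1 h2 h3 h4
          simp [pvFinA, pvFinB]
      | some (true, n) =>
          obtain ⟨hn, h2, h3, h4⟩ := hInv
          subst h2 h3 h4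
          simp [pvFinA, pvFinB, pvStepL_true]
      | some (false, n) =>
          obtain ⟨hn, h2, h3, h4⟩ := hInv
          subst h2 h3 h4
          by_cases h11 : 11 ≤ n
          · simp [pvFinA, pvFinB, pvStepL_false, h11, show n > 10 by omega]
            by_cases hp : (gs.foldl pvStepL (0, [])).1 > 0 <;> simp [hp]
          · simp [pvFinA, pvFinB, pvStepL_false, h11, show ¬ n > 10 by omega]
  | cons x xs ih =>
      intro dash len lines gs cur hInv
      simp only [List.foldl_cons]
      by_cases hx : x ≠ 0
      · -- truthy element
        have hk : decide (x ≠ 0) = true := decide_eq_true hx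
        have hA : pvStepA (dash, len, lines) x = (0, len + 1, lines) := by
          unfold pvStepA; rw [if_pos hx]
        rw [hA]
        match cur with
        | none =>
            obtain ⟨h1, h2, h3, h4⟩ := hInv
            subst h1 h2 h3 h4
            rw [pvStepG_none, hk]
            apply ih
            simp [pvInv]
        | some (true, n) =>
            obtain ⟨hn, h2, h3, h4⟩ := hInv
            subst h2 h3 h4
            rw [pvStepG_some, hk]
            simp only [BEq.rfl, if_pos]
            apply ih
            refine ⟨by omega, rfl, by omega, rfl⟩
        | some (false, n) =>
            obtain ⟨hn, h2, h3, h4⟩ := hInv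
            subst h2 h3 h4
            rw [pvStepG_some, hk]
            simp only [show (false == true) = false by rfl, Bool.false_eq_true, if_false]
            apply ih
            show pvInv 0 (_ + 1) _ (gs ++ [(false, n)]) (some (true, 1))
            refine ⟨by omega, rfl, ?_, ?_⟩ <;>
              rw [List.foldl_append, List.foldl_cons, List.foldl_nil, pvStepL_false] <;>
              by_cases h11 : 11 ≤ n
            · simp [show n > 10 by omega]
              by_cases hp : (gs.foldl pvStepL (0, [])).1 > 0 <;> simp [hp, h11]
            · simp [show ¬ n > 10 by omega, h11]
            · simp [show n > 10 by omega]
              by_cases hp : (gs.foldl pvStepL (0, [])).1 > 0 <;> simp [hp, h11]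
            · simp [show ¬ n > 10 by omega, h11]
      · -- zero element
        have hx0 : x = 0 := not_not.mp hx
        subst hx0
        have hk0 : decide ((0:Int) ≠ 0) = false := by decide
        have hA : pvStepA (dash, len, lines) 0 =
            if dash + 1 > 10 then (0, 0, if len > 0 then lines ++ [len] else lines)
            else (dash + 1, len, lines) := by
          unfold pvStepA; rw [if_neg (by omega)]
        rw [hA]
        match cur with
        | none =>
            obtain ⟨h1, h2, h3, h4⟩ := hInv
            subst h1 h2 h3 h4
            rw [pvStepG_none, hk0]
            rw [if_neg (by omega)]
            apply ih
            refine ⟨by omega, by decide, by simp, by simp⟩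
        | some (true, n) =>
            obtain ⟨hn, h2, h3, h4⟩ := hInv
            subst h2 h3 h4
            rw [pvStepG_some, hk0]
            simp only [show (true == false) = false by rfl, Bool.false_eq_true, if_false]
            rw [if_neg (by omega)]
            apply ih
            refine ⟨by omega, by decide, ?_, ?_⟩ <;>
              rw [List.foldl_append, List.foldl_cons, List.foldl_nil, pvStepL_true]
            · rw [if_neg (by omega)]
            · simp [show ¬ ((11:Int) ≤ 1) by omega]
        | some (false, n) =>
            obtain ⟨hn, h2, h3, h4⟩ := hInv
            subst h2
            rw [pvStepG_some, hk0]
            simp only [BEq.rfl, if_pos]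
            have hm0 : 0 ≤ n % 11 := Int.emod_nonneg n (by norm_num)
            have hm1 : n % 11 < 11 := Int.emod_lt_of_pos n (by norm_num)
            by_cases htr : n % 11 + 1 > 10
            · -- trigger: n % 11 = 10, the run reaches a multiple of 11 zeros
              have hmod : n % 11 = 10 := by omega
              rw [if_pos htr]
              apply ih
              refine ⟨by omega, by omega,
                (if_pos (show (11:Int) ≤ n + 1 by omega)).symm, ?_⟩
              subst h3 h4
              by_cases hold : 11 ≤ n <;>
                by_cases hp : (gs.foldl pvStepL (0, [])).1 > 0 <;>
                simp [hold, hp, show (11:Int) ≤ n + 1 by omega]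
            · -- no trigger
              rw [if_neg htr]
              apply ih
              have h11eq : (11 ≤ n + 1) ↔ (11 ≤ n) := by omega
              refine ⟨by omega, by omega, ?_, ?_⟩
              · subst h3; by_cases h11 : 11 ≤ n <;>
                  simp [h11, h11eq.mpr, show ¬ (11 ≤ n + 1) ↔ ¬ (11 ≤ n) from not_congr h11eq]
              · subst h4; by_cases h11 : 11 ≤ n
                · simp [h11, h11eq.mpr h11]
                · simp [h11, (not_congr h11eq).mpr h11]

-- ===== VERDICT (by name: the statement is the Claim_ definition above) =====
theorem lineTrace__spec : Claim_equal_lineTrace_ := by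
  intro binaryArray _
  show (pvFinA (binaryArray.foldl pvStepA (0, 0, []))).filter (fun x => decide (x > 5)) =
       (pvFinB (binaryArray.foldl pvStepG ([], none))).filter (fun x => decide (x > 5))
  rw [pv_main binaryArray 0 0 [] [] none (by simp [pvInv])]
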